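-- pv_equiv track=rewrite | github.com/blhall195/Mr_Zappy | Main board/code.py | linear_within_tol
-- ===== SOURCE A (Python) =====
-- def linear_within_tol(values, tol):
--     if len(values) != 3:
--         return False
--     for i in range(3):
--         for j in range(i + 1, 3):
--             if abs(values[i] - values[j]) > tol:
--                 return False
--     return True
-- ===== SOURCE B (Python) =====
-- def linear_within_tol(values, tol):
--     if len(values) != 3:
--         return False
--     return max(values) - min(values) <= tol
-- ===== Notes on version B (the rewrite author's own statement) =====
-- stated objective: simpler
-- what changed: Replaces the nested pairwise index loops with the closed form max(values) - min(values) <= tol after the length-3 guard.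
import Mathlib
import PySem

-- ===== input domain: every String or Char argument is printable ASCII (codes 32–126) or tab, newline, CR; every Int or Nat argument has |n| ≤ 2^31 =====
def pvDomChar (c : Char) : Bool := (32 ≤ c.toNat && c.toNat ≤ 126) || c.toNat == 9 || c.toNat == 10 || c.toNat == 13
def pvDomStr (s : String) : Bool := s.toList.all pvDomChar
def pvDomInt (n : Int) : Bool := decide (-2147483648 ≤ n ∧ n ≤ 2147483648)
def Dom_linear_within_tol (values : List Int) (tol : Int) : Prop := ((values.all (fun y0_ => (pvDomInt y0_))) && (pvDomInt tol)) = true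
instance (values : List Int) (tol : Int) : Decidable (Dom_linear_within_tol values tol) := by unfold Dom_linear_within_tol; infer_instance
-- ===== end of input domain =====

-- B replaces A's nested pairwise loops by the closed form max - min ≤ tol (simpler; same values on all Int inputs).

-- ===== PORT A =====
-- literal port: length guard, then for i in range(3): for j in range(i+1,3): early-return False
-- if |values[i]-values[j]| > tol (`.all` stops at the first failing pair like the early return);
-- indices are in range because length = 3, so pyGet? is defaulted with .getD 0 (never used).
def linear_within_tol (values : List Int) (tol : Int) : Bool :=
  if values.length ≠ 3 then false
  else
    (PySem.List.pyRange 0 3 1).all (fun i =>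
      (PySem.List.pyRange (i + 1) 3 1).all (fun j =>
        !(decide (|((PySem.List.pyGet? values i).getD 0) - ((PySem.List.pyGet? values j).getD 0)| > tol))))

-- ===== PORT B =====
def linear_within_tol_alt (values : List Int) (tol : Int) : Bool :=
  if values.length ≠ 3 then false
  else
    decide (((PySem.List.max? values (fun x => x)).getD 0)
            - ((PySem.List.min? values (fun x => x)).getD 0) ≤ tol)

-- ===== PRECONDITION & SPEC =====
def Spec_linear_within_tol (values : List Int) (tol : Int) (out : Bool) : Prop := out = linear_within_tol_alt values tol
instance (values : List Int) (tol : Int) (out : Bool) : Decidable (Spec_linear_within_tol values tol out) := by unfold Spec_linear_within_tol; infer_instance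

-- ===== CLAIM (what is proved, stated in full; the proofs are below) =====
def Claim_equal_linear_within_tol : Prop := ∀ (values : List Int) (tol : Int), Dom_linear_within_tol values tol → Spec_linear_within_tol values tol (linear_within_tol values tol)

-- ===== LEMMAS AND PROOFS =====

-- ===== VERDICT (by name: the statement is the Claim_ definition above) =====
theorem linear_within_tol_spec : Claim_equal_linear_within_tol := by
  intro values tol _
  unfold Spec_linear_within_tol linear_within_tol linear_within_tol_alt
  match values with
  | [] => simp
  | [a] => simp
  | [a, b] => simp
  | a :: b :: c :: d :: t => simp
  | [a, b, c] =>
    simp [PySem.List.pyRange, PySem.List.pyGet?, PySem.List.pyIdx?,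
          PySem.List.max?, PySem.List.min?,
          List.range_succ, Function.comp]
    split_ifs <;> simp_all <;> split_ifs <;>
      simp only [Option.getD_some, ← Bool.decide_and, ← decide_not,
        decide_eq_decide, lt_abs, not_or, not_lt] <;> omega
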